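-- pv_equiv track=rewrite | github.com/marcowindt/adventOfCode2019 | day_3.py | calc_points
-- ===== SOURCE A (Python) =====
-- from typing import List, Tuple
--
-- def calc_points(wire: List[Tuple[str, int]]):
--     visited = [(0, 0)]
--
--     for (direction, amount) in wire:
--         if direction == 'U':    # up
--             visited += [(visited[-1][0] + x, visited[-1][1]) for x in map(lambda x: x + 1, range(amount))]
--         elif direction == 'D':  # down
--             visited += [(visited[-1][0] - x, visited[-1][1]) for x in map(lambda x: x + 1, range(amount))]
--         elif direction == 'R':  # right
--             visited += [(visited[-1][0], visited[-1][1] + x) for x in map(lambda x: x + 1, range(amount))]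
--         elif direction == 'L':  # left
--             visited += [(visited[-1][0], visited[-1][1] - x) for x in map(lambda x: x + 1, range(amount))]
--
--     return visited
-- ===== SOURCE B (Python) =====
-- from typing import List, Tuple
--
-- DELTAS = {'U': (1, 0), 'D': (-1, 0), 'R': (0, 1), 'L': (0, -1)}
--
-- def calc_points(wire: List[Tuple[str, int]]):
--     x, y = 0, 0
--     visited = [(0, 0)]
--     for direction, amount in wire:
--         delta = DELTAS.get(direction)
--         if delta is None:
--             continue
--         dx, dy = delta
--         for _ in range(amount):
--             x += dx
--             y += dy
--             visited.append((x, y))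
--     return visited
-- ===== Notes on version B (the rewrite author's own statement) =====
-- stated objective: idiomatic
-- what changed: Replaces the four direction-specific offset list-comprehensions (each re-reading visited[-1]) with a single delta table and one mutable cursor advanced step by step; unknown directions are skipped by the table lookup exactly as A's if/elif chain does.
import Mathlib
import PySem

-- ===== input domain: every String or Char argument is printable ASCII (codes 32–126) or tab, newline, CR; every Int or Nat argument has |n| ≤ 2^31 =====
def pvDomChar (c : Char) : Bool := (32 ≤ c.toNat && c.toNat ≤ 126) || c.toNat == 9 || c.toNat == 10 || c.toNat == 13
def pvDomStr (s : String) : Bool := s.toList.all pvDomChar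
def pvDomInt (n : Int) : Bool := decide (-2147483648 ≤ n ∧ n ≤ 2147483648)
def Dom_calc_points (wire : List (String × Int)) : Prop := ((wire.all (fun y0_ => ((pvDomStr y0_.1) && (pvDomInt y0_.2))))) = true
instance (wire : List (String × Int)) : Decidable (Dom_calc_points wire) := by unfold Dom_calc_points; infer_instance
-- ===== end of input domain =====

-- B replaces A's four direction-specific offset comprehensions by a delta table plus a
-- step-by-step cursor loop (objective: idiomatic). Return values proved equal; A mutates
-- nothing observable.

-- ===== PORT A =====
-- the loop body of A, one segment: branch on the direction, append the offset comprehension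
-- (visited[-1] is read via pyGet?; 'visited' always starts from [(0,0)] so getD's default is never used)
def pvStepA (visited : List (Int × Int)) (seg : String × Int) : List (Int × Int) :=
  let direction := seg.1
  let amount := seg.2
  let last := (PySem.List.pyGet? visited (-1)).getD (0, 0)
  if direction == "U" then
    visited ++ ((PySem.List.pyRange 0 amount 1).map (fun x => x + 1)).map (fun x => (last.1 + x, last.2))
  else if direction == "D" then
    visited ++ ((PySem.List.pyRange 0 amount 1).map (fun x => x + 1)).map (fun x => (last.1 - x, last.2))
  else if direction == "R" then
    visited ++ ((PySem.List.pyRange 0 amount 1).map (fun x => x + 1)).map (fun x => (last.1, last.2 + x))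
  else if direction == "L" then
    visited ++ ((PySem.List.pyRange 0 amount 1).map (fun x => x + 1)).map (fun x => (last.1, last.2 - x))
  else visited

def calc_points (wire : List (String × Int)) : List (Int × Int) :=
  wire.foldl pvStepA [(0, 0)]

-- ===== PORT B =====
def pvDeltas : PySem.Dict String (Int × Int) :=
  PySem.Dict.ofList [("U", ((1 : Int), (0 : Int))), ("D", (-1, 0)), ("R", (0, 1)), ("L", (0, -1))]

-- the inner 'for _ in range(amount)' loop: advance the cursor, append each new point
def pvWalk (dx dy : Int) : Nat → (Int × Int) → List (Int × Int) → (Int × Int) × List (Int × Int)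
  | 0, cur, acc => (cur, acc)
  | n + 1, cur, acc =>
    let c := (cur.1 + dx, cur.2 + dy)
    pvWalk dx dy n c (acc ++ [c])

def pvStepB (st : (Int × Int) × List (Int × Int)) (seg : String × Int) :
    (Int × Int) × List (Int × Int) :=
  match PySem.Dict.get? pvDeltas seg.1 with
  | none => st
  | some (dx, dy) => pvWalk dx dy seg.2.toNat st.1 st.2

def calc_points_alt (wire : List (String × Int)) : List (Int × Int) :=
  (wire.foldl pvStepB ((0, 0), [(0, 0)])).2

-- ===== PRECONDITION & SPEC =====
def Spec_calc_points (wire : List (String × Int)) (out : List (Int × Int)) : Prop := out = calc_points_alt wire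
instance (wire : List (String × Int)) (out : List (Int × Int)) : Decidable (Spec_calc_points wire out) := by unfold Spec_calc_points; infer_instance

-- ===== CLAIM (what is proved, stated in full; the proofs are below) =====
def Claim_equal_calc_points : Prop := ∀ (wire : List (String × Int)), Dom_calc_points wire → Spec_calc_points wire (calc_points wire)

-- ===== LEMMAS AND PROOFS =====

-- closed form of the inner cursor loop
theorem pvWalk_spec (dx dy : Int) (n : Nat) :
    ∀ (c : Int × Int) (acc : List (Int × Int)),
      pvWalk dx dy n c acc =
        ((c.1 + dx * n, c.2 + dy * n),
          acc ++ (List.range n).map (fun (i : Nat) => (c.1 + dx * ((i : Int) + 1), c.2 + dy * ((i : Int) + 1)))) := by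
  induction n with
  | zero => intro c acc; simp [pvWalk]
  | succ n ih =>
    intro c acc
    rw [pvWalk, ih, List.range_succ_eq_map, List.map_cons, List.map_map]
    simp only [Prod.mk.injEq]
    refine ⟨⟨by push_cast; ring, by push_cast; ring⟩, ?_⟩
    rw [List.append_assoc]
    congr 1
    rw [List.singleton_append]
    congr 1
    · simp only [Prod.mk.injEq]; constructor <;> push_cast <;> ring
    · apply List.map_congr_left
      intro i _
      simp only [Function.comp_apply, Prod.mk.injEq]
      constructor <;> push_cast <;> ring

-- last element of the accumulator after one segment is the new cursor
theorem getLast?_walk (c : Int × Int) (dx dy : Int) (n : Nat) (acc : List (Int × Int))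
    (h : acc.getLast? = some c) :
    ((pvWalk dx dy n c acc).2).getLast? = some (pvWalk dx dy n c acc).1 := by
  rw [pvWalk_spec]
  cases n with
  | zero => simpa using h
  | succ n =>
    show (acc ++ _).getLast? = _
    rw [List.getLast?_append_of_ne_nil acc (by simp [List.range_succ])]
    rw [List.range_succ, List.map_append]
    simp

-- the literal delta table as an association list
theorem pvDeltas_eq :
    pvDeltas = PySem.Dict.mk [("U", ((1 : Int), (0 : Int))), ("D", (-1, 0)), ("R", (0, 1)), ("L", (0, -1))] := by
  decide

-- one segment: the A-side comprehension equals the B-side cursor walk (plus the last-element invariant)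
theorem step_eq (visited : List (Int × Int)) (c : Int × Int) (seg : String × Int)
    (h : visited.getLast? = some c) :
    pvStepA visited seg = (pvStepB (c, visited) seg).2 ∧
      ((pvStepB (c, visited) seg).2).getLast? = some (pvStepB (c, visited) seg).1 := by
  obtain ⟨d, a⟩ := seg
  have hlast : (PySem.List.pyGet? visited (-1)).getD (0, 0) = c := by
    rw [PySem.List.pyGet?_neg_one, h]; rfl
  by_cases hU : d = "U"
  · subst hU
    have hget : PySem.Dict.get? pvDeltas "U" = some (1, 0) := by decide
    refine ⟨?_, ?_⟩
    · simp only [pvStepA, pvStepB, hlast, hget]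
      rw [PySem.List.pyRange_one, pvWalk_spec]
      rw [if_pos (by decide : (("U" : String) == "U") = true)]
      simp only [List.map_map, Int.sub_zero]
      congr 1
      apply List.map_congr_left
      intro i _
      simp only [Function.comp_apply, Prod.mk.injEq]
      constructor <;> ring
    · simp only [pvStepB, hget]
      exact getLast?_walk c _ _ _ _ h
  · by_cases hD : d = "D"
    · subst hD
      have hget : PySem.Dict.get? pvDeltas "D" = some (-1, 0) := by decide
      refine ⟨?_, ?_⟩
      · simp only [pvStepA, pvStepB, hlast, hget]
        rw [PySem.List.pyRange_one, pvWalk_spec]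
        rw [if_neg (by decide : ¬ (("D" : String) == "U") = true), if_pos (by decide : (("D" : String) == "D") = true)]
        simp only [List.map_map, Int.sub_zero]
        congr 1
        apply List.map_congr_left
        intro i _
        simp only [Function.comp_apply, Prod.mk.injEq]
        constructor <;> ring
      · simp only [pvStepB, hget]
        exact getLast?_walk c _ _ _ _ h
    · by_cases hR : d = "R"
      · subst hR
        have hget : PySem.Dict.get? pvDeltas "R" = some (0, 1) := by decide
        refine ⟨?_, ?_⟩
        · simp only [pvStepA, pvStepB, hlast, hget]
          rw [PySem.List.pyRange_one, pvWalk_spec]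
          rw [if_neg (by decide : ¬ (("R" : String) == "U") = true), if_neg (by decide : ¬ (("R" : String) == "D") = true), if_pos (by decide : (("R" : String) == "R") = true)]
          simp only [List.map_map, Int.sub_zero]
          congr 1
          apply List.map_congr_left
          intro i _
          simp only [Function.comp_apply, Prod.mk.injEq]
          constructor <;> ring
        · simp only [pvStepB, hget]
          exact getLast?_walk c _ _ _ _ h
      · by_cases hL : d = "L"
        · subst hL
          have hget : PySem.Dict.get? pvDeltas "L" = some (0, -1) := by decide
          refine ⟨?_, ?_⟩
          · simp only [pvStepA, pvStepB, hlast, hget]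
            rw [PySem.List.pyRange_one, pvWalk_spec]
            rw [if_neg (by decide : ¬ (("L" : String) == "U") = true), if_neg (by decide : ¬ (("L" : String) == "D") = true), if_neg (by decide : ¬ (("L" : String) == "R") = true), if_pos (by decide : (("L" : String) == "L") = true)]
            simp only [List.map_map, Int.sub_zero]
            congr 1
            apply List.map_congr_left
            intro i _
            simp only [Function.comp_apply, Prod.mk.injEq]
            constructor <;> ring
          · simp only [pvStepB, hget]
            exact getLast?_walk c _ _ _ _ h
        · have hnone : PySem.Dict.get? pvDeltas d = none := by
            rw [pvDeltas_eq]
            simp [beq_iff_eq,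
              Ne.symm hU, Ne.symm hD, Ne.symm hR, Ne.symm hL, PySem.Dict.get?]
          refine ⟨?_, ?_⟩
          · simp only [pvStepA, pvStepB, hnone]
            rw [if_neg, if_neg, if_neg, if_neg] <;> simp [hU, hD, hR, hL]
          · simpa [pvStepB, hnone] using h

-- the main loop invariant: A's accumulated list equals B's, and B's last element is its cursor
theorem loop_eq (wire : List (String × Int)) :
    ∀ (visited : List (Int × Int)) (c : Int × Int), visited.getLast? = some c →
      wire.foldl pvStepA visited = (wire.foldl pvStepB (c, visited)).2 ∧
        ((wire.foldl pvStepB (c, visited)).2).getLast? = some (wire.foldl pvStepB (c, visited)).1 := by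
  induction wire with
  | nil => intro visited c h; exact ⟨rfl, by simpa using h⟩
  | cons seg rest ih =>
    intro visited c h
    obtain ⟨h1, h2⟩ := step_eq visited c seg h
    have := ih (pvStepB (c, visited) seg).2 (pvStepB (c, visited) seg).1 h2
    simp only [List.foldl_cons, h1]
    simpa using this

-- ===== VERDICT (by name: the statement is the Claim_ definition above) =====
theorem calc_points_spec : Claim_equal_calc_points := by
  intro wire _
  unfold Spec_calc_points calc_points calc_points_alt
  exact (loop_eq wire [(0, 0)] (0, 0) rfl).1
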